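-- pv_equiv track=rewrite | github.com/vdcrim/AvsP-macros | Auto-crop.py | get_crop_value
-- ===== SOURCE A (Python) =====
-- from collections import defaultdict
--
-- def get_crop_value(seq):
--     """Get the most repeated value on a sequence if it repeats more than 50%,
--     the minimum value otherwise"""
--     d = defaultdict(int)
--     for i in seq:
--         d[i] += 1
--     max = sorted(d.keys(), key=lambda x:-d[x])[0]
--     if d[max] > len(seq) / 2:
--         return max
--     else:
--         ret_val = max
--         for value in seq:
--             if value < ret_val:
--                 ret_val = value
--         return ret_val
-- ===== SOURCE B (Python) =====
-- def get_crop_value(seq):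
--     """Get the most repeated value on a sequence if it repeats more than 50%,
--     the minimum value otherwise"""
--     # Boyer-Moore majority vote: O(1) extra space instead of a dict + sort.
--     cand = seq[0]
--     count = 0
--     for x in seq:
--         if count == 0:
--             cand = x
--         count += 1 if x == cand else -1
--     if 2 * seq.count(cand) > len(seq):
--         return cand
--     return min(seq)
-- ===== Notes on version B (the rewrite author's own statement) =====
-- stated objective: faster
-- what changed: Replaces the frequency dict plus full sort of the keys with a Boyer-Moore majority-vote pass and a verification count; min(seq) replaces the manual running-minimum loop.
import Mathlib
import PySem

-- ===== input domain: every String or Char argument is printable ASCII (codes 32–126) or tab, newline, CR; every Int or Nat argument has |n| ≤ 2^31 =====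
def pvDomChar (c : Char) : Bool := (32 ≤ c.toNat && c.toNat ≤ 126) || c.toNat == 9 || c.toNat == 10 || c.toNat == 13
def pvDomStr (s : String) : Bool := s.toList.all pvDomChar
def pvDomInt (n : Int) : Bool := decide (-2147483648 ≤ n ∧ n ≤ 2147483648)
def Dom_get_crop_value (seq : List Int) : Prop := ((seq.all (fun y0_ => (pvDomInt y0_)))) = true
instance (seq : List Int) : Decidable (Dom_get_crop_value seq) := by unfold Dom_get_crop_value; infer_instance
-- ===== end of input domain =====

-- B replaces A's frequency dict + key sort by a Boyer–Moore majority-vote pass (objective: faster).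
-- Both programs raise on the empty list (IndexError in A, in B too); Pre_ excludes it.

-- ===== PORT A =====
def get_crop_value (seq : List Int) : Int :=
  -- d = defaultdict(int); for i in seq: d[i] += 1
  let d : PySem.Dict Int Int := seq.foldl (fun d i => d.modify i 0 (· + 1)) PySem.Dict.empty
  -- max = sorted(d.keys(), key=lambda x:-d[x])[0]   ([0] raises on empty seq; Pre_ excludes)
  let m : Int := (PySem.List.sorted d.keys (fun x => -(d.getD x 0)) false).headD 0
  -- if d[max] > len(seq) / 2:  (float compare; exact for integers as 2*d[max] > len(seq))
  if 2 * d.getD m 0 > (seq.length : Int) then m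
  else
    -- ret_val = max; for value in seq: if value < ret_val: ret_val = value
    seq.foldl (fun r v => if v < r then v else r) m

-- ===== PORT B =====
def get_crop_value_alt (seq : List Int) : Int :=
  -- cand = seq[0]; count = 0   (seq[0] raises on empty seq; Pre_ excludes)
  let init : Int := seq.headD 0
  -- for x in seq: if count == 0: cand = x; count += 1 if x == cand else -1
  let p : Int × Int := seq.foldl (fun (s : Int × Int) x =>
      let c := if s.2 == 0 then x else s.1
      (c, s.2 + (if x == c then 1 else -1))) (init, 0)
  -- if 2 * seq.count(cand) > len(seq): return cand
  if 2 * (seq.count p.1 : Int) > (seq.length : Int) then p.1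
  -- return min(seq)
  else ((PySem.List.min? seq (fun y => y)).getD 0)

-- ===== PRECONDITION & SPEC =====
-- Pre_ excludes exactly the empty list, on which both Pythons raise (A: IndexError, B: IndexError).
def Pre_get_crop_value (seq : List Int) : Prop := seq ≠ []
instance (seq : List Int) : Decidable (Pre_get_crop_value seq) := by unfold Pre_get_crop_value; infer_instance
def pvWitness_get_crop_value : List Int := [2, 1, 2]

def Spec_get_crop_value (seq : List Int) (out : Int) : Prop := out = get_crop_value_alt seq
instance (seq : List Int) (out : Int) : Decidable (Spec_get_crop_value seq out) := by unfold Spec_get_crop_value; infer_instance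

-- ===== CLAIM (what is proved, stated in full; the proofs are below) =====
def Claim_equal_get_crop_value : Prop := ∀ (seq : List Int), Dom_get_crop_value seq → Pre_get_crop_value seq → Spec_get_crop_value seq (get_crop_value seq)

-- ===== LEMMAS AND PROOFS =====

-- the Boyer–Moore fold step
def bmStep (s : Int × Int) (x : Int) : Int × Int :=
  let c := if s.2 == 0 then x else s.1
  (c, s.2 + (if x == c then 1 else -1))

theorem count_cons_int (y : Int) (t : List Int) (x : Int) :
    (((y :: t).count x : Int)) = (t.count x : Int) + (if x = y then 1 else 0) := by
  rw [List.count_cons]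
  rcases eq_or_ne x y with hxy | hxy
  · simp [hxy]
  · simp [hxy, Ne.symm hxy]

theorem length_cons_int (y : Int) (t : List Int) :
    (((y :: t).length : Int)) = (t.length : Int) + 1 := by
  push_cast [List.length_cons]; ring

theorem bm_inv (l : List Int) (cand count : Int) (h : 0 ≤ count) :
    0 ≤ (l.foldl bmStep (cand, count)).2 ∧
    ∀ x : Int, 2 * (l.count x : Int) + (if x = cand then count else -count) ≤
      (l.length : Int) + (if x = (l.foldl bmStep (cand, count)).1 then (l.foldl bmStep (cand, count)).2
                          else -(l.foldl bmStep (cand, count)).2) := by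
  induction l generalizing cand count with
  | nil =>
    refine ⟨h, fun x => ?_⟩
    rcases eq_or_ne x cand with hx | hx <;> simp [hx]
  | cons y t ih =>
    simp only [List.foldl_cons]
    rcases eq_or_ne count 0 with h0 | h0
    · -- count == 0: candidate becomes y, counter 1
      have hstep : bmStep (cand, count) y = (y, count + 1) := by simp [bmStep, h0]
      rw [hstep]
      obtain ⟨h1, h2⟩ := ih y (count + 1) (by omega)
      refine ⟨h1, fun x => ?_⟩
      have h3 := h2 x
      rw [count_cons_int, length_cons_int]
      rcases eq_or_ne x y with hxy | hxy <;>
        rcases eq_or_ne x cand with hxc | hxc <;>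
          simp only [if_pos, if_neg, hxy, hxc, if_true, if_false] at h3 ⊢ <;> omega
    · rcases eq_or_ne y cand with hy | hy
      · -- y == cand: counter + 1
        have hstep : bmStep (cand, count) y = (cand, count + 1) := by simp [bmStep, h0, hy]
        rw [hstep]
        obtain ⟨h1, h2⟩ := ih cand (count + 1) (by omega)
        refine ⟨h1, fun x => ?_⟩
        have h3 := h2 x
        rw [count_cons_int, length_cons_int]
        subst hy
        rcases eq_or_ne x y with hxy | hxy <;>
          simp only [hxy, if_true, if_false, if_pos, if_neg] at h3 ⊢ <;> omega
      · -- y != cand: counter - 1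
        have hstep : bmStep (cand, count) y = (cand, count + -1) := by simp [bmStep, h0, hy]
        rw [hstep]
        obtain ⟨h1, h2⟩ := ih cand (count + -1) (by omega)
        refine ⟨h1, fun x => ?_⟩
        have h3 := h2 x
        rw [count_cons_int, length_cons_int]
        rcases eq_or_ne x y with hxy | hxy
        · have hxc : x ≠ cand := fun e => hy (hxy ▸ e)
          simp only [hxy, hxc, if_true, if_false, if_pos, if_neg] at h3 ⊢ <;> omega
        · rcases eq_or_ne x cand with hxc | hxc <;>
            simp only [hxy, hxc, if_true, if_false, if_pos, if_neg] at h3 ⊢ <;> omega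

-- the final candidate is the seed or an element of the list
theorem bm_cand_mem (l : List Int) (cand count : Int) :
    (l.foldl bmStep (cand, count)).1 = cand ∨ (l.foldl bmStep (cand, count)).1 ∈ l := by
  induction l generalizing cand count with
  | nil => exact Or.inl rfl
  | cons y t ih =>
    simp only [List.foldl_cons]
    rcases ih (bmStep (cand, count) y).1 (bmStep (cand, count) y).2 with h | h
    · rw [Prod.mk.eta] at h
      rw [h]; unfold bmStep
      rcases eq_or_ne count 0 with h0 | h0 <;> simp [h0]
    · rw [Prod.mk.eta] at h
      exact Or.inr (List.mem_cons_of_mem _ h)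

-- if x is a strict majority, the Boyer–Moore candidate is x
theorem bm_majority (l : List Int) (cand : Int) (x : Int)
    (hmaj : 2 * (l.count x : Int) > (l.length : Int)) :
    (l.foldl bmStep (cand, 0)).1 = x := by
  by_contra hne
  obtain ⟨hk0, hinv⟩ := bm_inv l cand 0 le_rfl
  have h := hinv x
  have hne' : ¬ (x = (l.foldl bmStep (cand, 0)).1) := fun e => hne e.symm
  rw [if_neg hne'] at h
  have hz : (if x = cand then (0 : Int) else -0) = 0 := by
    rcases eq_or_ne x cand with e | e <;> simp [e]
  rw [hz] at h
  omega

-- running minimum with 'if v < r then v else r' is foldl min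
theorem foldl_if_min (l : List Int) (a : Int) :
    l.foldl (fun r v => if v < r then v else r) a = l.foldl min a := by
  induction l generalizing a with
  | nil => rfl
  | cons y t ih =>
    simp only [List.foldl_cons, ih]
    congr 1
    rcases lt_or_ge y a with h | h <;> simp [min_def] <;> omega

theorem foldl_min_min (l : List Int) (a b : Int) :
    l.foldl min (min a b) = min a (l.foldl min b) := by
  induction l generalizing b with
  | nil => rfl
  | cons y t ih =>
    simp only [List.foldl_cons, min_assoc, ih]

-- foldl min absorbs a starting value that is a member of the list
theorem foldl_min_absorb (h : Int) (t : List Int) (m : Int) (hm : m ∈ h :: t) :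
    (h :: t).foldl min m = t.foldl min h := by
  have hle : t.foldl min h ≤ m :=
    PySem.List.min?_isMin (PySem.List.min?_id_cons h t) m hm
  calc (h :: t).foldl min m = t.foldl min (min m h) := by simp
    _ = min m (t.foldl min h) := foldl_min_min t m h
    _ = t.foldl min h := min_eq_right hle

-- ===== VERDICT (by name: the statement is the Claim_ definition above) =====
theorem get_crop_value_spec : Claim_equal_get_crop_value := by
  intro seq _ hpre
  unfold Spec_get_crop_value get_crop_value get_crop_value_alt
  obtain ⟨h, t, rfl⟩ : ∃ h t, seq = h :: t := by
    cases seq with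
    | nil => exact absurd rfl hpre
    | cons h t => exact ⟨h, t, rfl⟩
  simp only [List.headD_cons]
  have hd : (h :: t).foldl (fun d i => d.modify i 0 (· + 1)) PySem.Dict.empty
      = PySem.Dict.counter (h :: t) := (PySem.Dict.counter_eq_foldl (h :: t)).symm
  rw [hd]
  have hfold : ((h :: t).foldl (fun (s : Int × Int) x =>
      let c := if s.2 == 0 then x else s.1
      (c, s.2 + (if x == c then 1 else -1))) (h, 0)) = (h :: t).foldl bmStep (h, 0) := rfl
  rw [hfold]
  have hgetD : ∀ v : Int, (PySem.Dict.counter (h :: t)).getD v 0 = ((h :: t).count v : Int) :=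
    fun v => PySem.Dict.getD_counter (h :: t) v
  have hkeys : (PySem.Dict.counter (h :: t)).keys = PySem.Set.ofList (h :: t) :=
    PySem.Dict.keys_counter (h :: t)
  obtain ⟨m, rest, hsort⟩ : ∃ m rest,
      PySem.List.sorted (PySem.Dict.counter (h :: t)).keys
        (fun x => -((PySem.Dict.counter (h :: t)).getD x 0)) false = m :: rest := by
    cases hs : PySem.List.sorted (PySem.Dict.counter (h :: t)).keys
        (fun x => -((PySem.Dict.counter (h :: t)).getD x 0)) false with
    | nil =>
      rw [PySem.List.sorted_eq_nil_iff, hkeys] at hs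
      have hmem : h ∈ PySem.Set.ofList (h :: t) :=
        (PySem.Set.mem_ofList (h :: t) h).2 (List.mem_cons_self ..)
      rw [hs] at hmem
      exact absurd hmem (List.not_mem_nil)
    | cons m rest => exact ⟨m, rest, rfl⟩
  rw [hsort]
  simp only [List.headD_cons]
  have hmmem : m ∈ h :: t := by
    have hmk : m ∈ (PySem.Dict.counter (h :: t)).keys := by
      rw [← PySem.List.mem_sorted _ (fun x => -((PySem.Dict.counter (h :: t)).getD x 0)) false, hsort]
      exact List.mem_cons_self ..
    rw [hkeys] at hmk
    exact (PySem.Set.mem_ofList (h :: t) m).1 hmk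
  have hmax : ∀ y ∈ h :: t, ((h :: t).count y : Int) ≤ ((h :: t).count m : Int) := by
    intro y hy
    have hyk : y ∈ (PySem.Dict.counter (h :: t)).keys := by
      rw [hkeys]; exact (PySem.Set.mem_ofList (h :: t) y).2 hy
    have hle := PySem.List.key_head_sorted_le _ _ hsort y hyk
    simp only [hgetD] at hle
    omega
  rw [hgetD m]
  by_cases hmaj : 2 * ((h :: t).count m : Int) > ((h :: t).length : Int)
  · -- strict majority: both branches return m
    have hc : ((h :: t).foldl bmStep (h, 0)).1 = m := bm_majority (h :: t) h m hmaj
    rw [hc, if_pos hmaj, if_pos hmaj]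
  · -- no strict majority: both branches return min(seq)
    have hcm : ((h :: t).foldl bmStep (h, 0)).1 ∈ h :: t := by
      rcases bm_cand_mem (h :: t) h 0 with hcc | hcc
      · rw [hcc]; exact List.mem_cons_self ..
      · exact hcc
    have hcnomaj : ¬ (2 * ((h :: t).count ((h :: t).foldl bmStep (h, 0)).1 : Int) > ((h :: t).length : Int)) := by
      have := hmax _ hcm
      omega
    rw [if_neg hmaj, if_neg hcnomaj]
    rw [foldl_if_min, foldl_min_absorb h t m hmmem, PySem.List.min?_id_cons h t]
    rfl
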